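-- pv_equiv track=rewrite | github.com/greatpersonnot27/Chess | libs/figures.py | _get_all_moves_sliders
-- ===== SOURCE A (Python) =====
-- def _get_all_moves_sliders(pos, vectors):
--     """
--     This method is used to get all the moves of Queen, Bishop and Rook.
--     Queen, Bishop and Rook are sliders, because they slide towards the vector direction.
--
--         Returns:
--
--             moves (list): list of tuples of tuples containing two integers describing the move
--     """
--     moves = []
--
--     for x, y in vectors:
--         move_list = []
--         move = (pos[0] + x, pos[1] + y)
--         while 0 <= move[0] <= 7 and 0 <= move[1] <= 7:
--             move_list.append(move)
--             move = (move[0] + x, move[1] + y)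
--         if move_list:
--             moves.append(move_list)
--
--     return moves
-- ===== SOURCE B (Python) =====
-- def _axis_bound(p, d):
--     if d == 0:
--         return 8 if 0 <= p <= 7 else 0
--     if not (0 <= p + d <= 7):
--         return 0
--     if d > 0:
--         return (7 - p) // d
--     return p // (-d)
--
--
-- def _get_all_moves_sliders(pos, vectors):
--     moves = []
--     for x, y in vectors:
--         n = min(_axis_bound(pos[0], x), _axis_bound(pos[1], y))
--         if n >= 1:
--             moves.append([(pos[0] + k * x, pos[1] + k * y) for k in range(1, n + 1)])
--     return moves
-- ===== Notes on version B (the rewrite author's own statement) =====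
-- stated objective: alternative
-- what changed: B replaces A's square-by-square while-walk along each vector with a closed-form ray length: per axis a floor-division bound derived from the direction sign, take the min, then build the ray directly with one range comprehension.
import Mathlib
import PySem

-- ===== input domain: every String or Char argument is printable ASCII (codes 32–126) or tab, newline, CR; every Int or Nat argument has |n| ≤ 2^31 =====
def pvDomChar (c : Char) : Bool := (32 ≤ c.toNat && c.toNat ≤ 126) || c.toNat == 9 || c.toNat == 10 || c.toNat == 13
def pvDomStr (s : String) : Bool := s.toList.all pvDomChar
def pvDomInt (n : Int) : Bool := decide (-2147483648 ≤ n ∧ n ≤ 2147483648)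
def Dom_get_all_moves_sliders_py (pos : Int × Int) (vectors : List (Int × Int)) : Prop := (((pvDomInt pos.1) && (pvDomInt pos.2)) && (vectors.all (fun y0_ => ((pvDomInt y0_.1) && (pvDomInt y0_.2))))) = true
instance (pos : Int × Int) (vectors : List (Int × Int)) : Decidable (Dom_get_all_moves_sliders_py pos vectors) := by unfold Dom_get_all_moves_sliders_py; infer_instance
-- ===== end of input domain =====

-- B computes each ray's length in closed form (per-axis floor-division bounds) and builds it with
-- one range comprehension, instead of A's square-by-square while-walk; objective: alternative.


-- ===== PORT A =====
-- the while loop, with fuel only to make it total in Lean: inside Pre_ the loop runs at most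
-- 8 iterations (each step moves at least one on-board coordinate), so 16 fuel is never exhausted
def pvWalkA (move : Int × Int) (x y : Int) : Nat → List (Int × Int)
  | 0 => []
  | fuel + 1 =>
    if 0 ≤ move.1 ∧ move.1 ≤ 7 ∧ 0 ≤ move.2 ∧ move.2 ≤ 7 then
      move :: pvWalkA (move.1 + x, move.2 + y) x y fuel
    else []

def get_all_moves_sliders_py (pos : Int × Int) (vectors : List (Int × Int)) : List (List (Int × Int)) :=
  vectors.foldl
    (fun moves v =>
      let move_list := pvWalkA (pos.1 + v.1, pos.2 + v.2) v.1 v.2 16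
      if move_list ≠ [] then moves ++ [move_list] else moves)
    []

-- ===== PORT B =====
def pvAxisBound (p d : Int) : Int :=
  if d = 0 then (if 0 ≤ p ∧ p ≤ 7 then 8 else 0)
  else if ¬ (0 ≤ p + d ∧ p + d ≤ 7) then 0
  else if 0 < d then PySem.Int.floordiv (7 - p) d
  else PySem.Int.floordiv p (-d)

def get_all_moves_sliders_py_alt (pos : Int × Int) (vectors : List (Int × Int)) : List (List (Int × Int)) :=
  vectors.foldl
    (fun moves v =>
      let n := min (pvAxisBound pos.1 v.1) (pvAxisBound pos.2 v.2)
      if 1 ≤ n then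
        moves ++ [(PySem.List.pyRange 1 (n + 1) 1).map (fun k => (pos.1 + k * v.1, pos.2 + k * v.2))]
      else moves)
    []

-- ===== PRECONDITION & SPEC =====
-- Pre_ excludes exactly the inputs where A never returns: vector (0,0) with pos on the board
-- makes A's while loop spin forever.
def Pre_get_all_moves_sliders_py (pos : Int × Int) (vectors : List (Int × Int)) : Prop :=
  ((0, 0) : Int × Int) ∈ vectors → ¬ (0 ≤ pos.1 ∧ pos.1 ≤ 7 ∧ 0 ≤ pos.2 ∧ pos.2 ≤ 7)
instance (pos : Int × Int) (vectors : List (Int × Int)) : Decidable (Pre_get_all_moves_sliders_py pos vectors) := by unfold Pre_get_all_moves_sliders_py; infer_instance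

def pvWitness_get_all_moves_sliders_py : (Int × Int) × (List (Int × Int)) :=
  ((3, 3), [(1, 0), (0, -1), (-1, 1)])

def Spec_get_all_moves_sliders_py (pos : Int × Int) (vectors : List (Int × Int)) (out : List (List (Int × Int))) : Prop := out = get_all_moves_sliders_py_alt pos vectors
instance (pos : Int × Int) (vectors : List (Int × Int)) (out : List (List (Int × Int))) : Decidable (Spec_get_all_moves_sliders_py pos vectors out) := by unfold Spec_get_all_moves_sliders_py; infer_instance

-- ===== CLAIM (what is proved, stated in full; the proofs are below) =====
def Claim_equal_get_all_moves_sliders_py : Prop := ∀ (pos : Int × Int) (vectors : List (Int × Int)), Dom_get_all_moves_sliders_py pos vectors → Pre_get_all_moves_sliders_py pos vectors → Spec_get_all_moves_sliders_py pos vectors (get_all_moves_sliders_py pos vectors)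

-- ===== LEMMAS AND PROOFS =====

theorem pvAxisBound_pos_iff (p d : Int) :
    1 ≤ pvAxisBound p d ↔ (0 ≤ p + d ∧ p + d ≤ 7) := by
  unfold pvAxisBound
  rcases lt_trichotomy d 0 with hd | hd | hd
  · simp only [if_neg (by omega : ¬ d = 0), if_neg (by omega : ¬ 0 < d)]
    by_cases h : 0 ≤ p + d ∧ p + d ≤ 7
    · rw [if_neg (by simpa using h), PySem.Int.le_floordiv_iff_mul_le (by omega)]
      constructor <;> intro <;> omega
    · rw [if_pos (by simpa using h)]; omega
  · subst hd; split_ifs with h <;> omega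
  · simp only [if_neg (by omega : ¬ d = 0), if_pos hd]
    by_cases h : 0 ≤ p + d ∧ p + d ≤ 7
    · rw [if_neg (by simpa using h), PySem.Int.le_floordiv_iff_mul_le hd]
      constructor <;> intro <;> omega
    · rw [if_pos (by simpa using h)]; omega

theorem pvAxisBound_le_8 (p d : Int) (hd : d ≠ 0) : pvAxisBound p d ≤ 8 := by
  unfold pvAxisBound
  rw [if_neg hd]
  by_cases h : 0 ≤ p + d ∧ p + d ≤ 7
  · rw [if_neg (by simpa using h)]
    rcases lt_or_gt_of_ne hd with hlt | hgt
    · rw [if_neg (by omega)]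
      have := (PySem.Int.le_floordiv_iff_mul_le (a := p) (b := -d) (q := 9) (by omega)).mp
      by_contra hc; have h9 := this (by omega); nlinarith [h.1, h.2, hlt]
    · rw [if_pos hgt]
      have := (PySem.Int.le_floordiv_iff_mul_le (a := 7 - p) (b := d) (q := 9) hgt).mp
      by_contra hc; have h9 := this (by omega); nlinarith [h.1, h.2, hgt]
  · rw [if_pos (by simpa using h)]; omega

theorem pvAxisBound_step (p d : Int) (hd : d ≠ 0) (h1 : 1 ≤ pvAxisBound p d) :
    pvAxisBound (p + d) d = pvAxisBound p d - 1 := by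
  have hin := (pvAxisBound_pos_iff p d).mp h1
  rcases lt_or_gt_of_ne hd with hlt | hgt
  · -- d < 0 : bound = p // (-d)
    have hb : pvAxisBound p d = PySem.Int.floordiv p (-d) := by
      unfold pvAxisBound; rw [if_neg hd, if_neg (by simpa using hin), if_neg (by omega)]
    by_cases h2 : 0 ≤ p + d + d ∧ p + d + d ≤ 7
    · have hb' : pvAxisBound (p + d) d = PySem.Int.floordiv (p + d) (-d) := by
        unfold pvAxisBound; rw [if_neg hd, if_neg (by simpa using h2), if_neg (by omega)]
      rw [hb, hb']
      rw [PySem.Int.floordiv_eq_iff_of_pos (by omega)] at *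
      have := PySem.Int.floordiv_eq_iff_of_pos (a := p) (b := -d) (q := PySem.Int.floordiv p (-d)) (by omega) |>.mpr
      have hq := (PySem.Int.floordiv_eq_iff_of_pos (a := p) (b := -d)
        (q := PySem.Int.floordiv p (-d)) (by omega)).mp rfl
      constructor <;> nlinarith [hq.1, hq.2]
    · -- p + 2d out of range: new bound 0, old bound must be 1
      have hb' : pvAxisBound (p + d) d = 0 := by
        unfold pvAxisBound; rw [if_neg hd, if_pos (by simpa using h2)]
      rw [hb, hb']
      have hq := (PySem.Int.floordiv_eq_iff_of_pos (a := p) (b := -d)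
        (q := PySem.Int.floordiv p (-d)) (by omega)).mp rfl
      -- p + 2d < 0 (since p + d ≤ 7 and d < 0 gives p+2d ≤ 7); so p < 2(-d) → floordiv = 1
      have hlow : p + d + d < 0 := by omega
      nlinarith [hq.1, hq.2, hb ▸ h1]
  · -- 0 < d : bound = (7 - p) // d
    have hb : pvAxisBound p d = PySem.Int.floordiv (7 - p) d := by
      unfold pvAxisBound; rw [if_neg hd, if_neg (by simpa using hin), if_pos hgt]
    by_cases h2 : 0 ≤ p + d + d ∧ p + d + d ≤ 7
    · have hb' : pvAxisBound (p + d) d = PySem.Int.floordiv (7 - (p + d)) d := by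
        unfold pvAxisBound; rw [if_neg hd, if_neg (by simpa using h2), if_pos hgt]
      rw [hb, hb']
      rw [PySem.Int.floordiv_eq_iff_of_pos hgt]
      have hq := (PySem.Int.floordiv_eq_iff_of_pos (a := 7 - p) (b := d)
        (q := PySem.Int.floordiv (7 - p) d) hgt).mp rfl
      constructor <;> nlinarith [hq.1, hq.2]
    · have hb' : pvAxisBound (p + d) d = 0 := by
        unfold pvAxisBound; rw [if_neg hd, if_pos (by simpa using h2)]
      rw [hb, hb']
      have hq := (PySem.Int.floordiv_eq_iff_of_pos (a := 7 - p) (b := d)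
        (q := PySem.Int.floordiv (7 - p) d) hgt).mp rfl
      have hhigh : 7 < p + d + d := by omega
      nlinarith [hq.1, hq.2, hb ▸ h1]

-- abbreviation for the ray length used by B
theorem pvMin_step (p0 p1 x y : Int) (hv : ¬ (x = 0 ∧ y = 0))
    (h1 : 1 ≤ min (pvAxisBound p0 x) (pvAxisBound p1 y)) :
    min (pvAxisBound (p0 + x) x) (pvAxisBound (p1 + y) y)
      = min (pvAxisBound p0 x) (pvAxisBound p1 y) - 1 := by
  by_cases hx : x = 0
  · have hy : y ≠ 0 := fun h => hv ⟨hx, h⟩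
    subst hx
    have e0 : pvAxisBound (p0 + 0) 0 = pvAxisBound p0 0 := by norm_num
    rw [e0, pvAxisBound_step p1 y hy (by omega)]
    have h8 : pvAxisBound p1 y ≤ 8 := pvAxisBound_le_8 p1 y hy
    have hb0 : pvAxisBound p0 0 = 8 := by
      have := (pvAxisBound_pos_iff p0 0).mp (by omega)
      unfold pvAxisBound; rw [if_pos rfl, if_pos (by omega)]
    rw [hb0] at *; omega
  · by_cases hy : y = 0
    · subst hy
      have e0 : pvAxisBound (p1 + 0) 0 = pvAxisBound p1 0 := by norm_num
      rw [e0, pvAxisBound_step p0 x hx (by omega)]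
      have h8 : pvAxisBound p0 x ≤ 8 := pvAxisBound_le_8 p0 x hx
      have hb0 : pvAxisBound p1 0 = 8 := by
        have := (pvAxisBound_pos_iff p1 0).mp (by omega)
        unfold pvAxisBound; rw [if_pos rfl, if_pos (by omega)]
      rw [hb0] at *; omega
    · rw [pvAxisBound_step p0 x hx (by omega), pvAxisBound_step p1 y hy (by omega)]
      omega

-- the walk equals the closed-form ray, with enough fuel; the (0,0) vector is only admitted off board
theorem pvWalkA_eq_ray (x y : Int) :
    ∀ (fuel : Nat) (p0 p1 : Int),
      (x = 0 ∧ y = 0 → min (pvAxisBound p0 x) (pvAxisBound p1 y) ≤ 0) →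
      (min (pvAxisBound p0 x) (pvAxisBound p1 y)).toNat < fuel →
      pvWalkA (p0 + x, p1 + y) x y fuel
        = (PySem.List.pyRange 1 (min (pvAxisBound p0 x) (pvAxisBound p1 y) + 1) 1).map
            (fun k => (p0 + k * x, p1 + k * y)) := by
  intro fuel
  induction fuel with
  | zero => intro p0 p1 _ h; omega
  | succ fuel ih =>
    intro p0 p1 hv h
    set n := min (pvAxisBound p0 x) (pvAxisBound p1 y) with hn
    by_cases h1 : 1 ≤ n
    · have hv' : ¬ (x = 0 ∧ y = 0) := by
        intro hc; have := hv hc; omega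
      have hin : 0 ≤ p0 + x ∧ p0 + x ≤ 7 ∧ 0 ≤ p1 + y ∧ p1 + y ≤ 7 := by
        have hx := (pvAxisBound_pos_iff p0 x).mp (by omega)
        have hy := (pvAxisBound_pos_iff p1 y).mp (by omega)
        exact ⟨hx.1, hx.2, hy.1, hy.2⟩
      have hstep := pvMin_step p0 p1 x y hv' h1
      rw [pvWalkA, if_pos hin]
      have := ih (p0 + x) (p1 + y) (fun hc => absurd hc hv') (by rw [hstep]; omega)
      rw [this, hstep]
      rw [PySem.List.pyRange_one_cons (by omega : (1:Int) < n + 1)]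
      simp only [List.map_cons, one_mul]
      congr 1
      rw [PySem.List.pyRange_one, PySem.List.pyRange_one, List.map_map, List.map_map]
      have he : (n + 1 - (1 + 1)).toNat = (n - 1 + 1 - 1).toNat := by omega
      rw [he]
      apply List.map_congr_left
      intro a _
      simp only [Function.comp_apply, Prod.mk.injEq]
      constructor <;> ring
    · rw [pvWalkA, if_neg, PySem.List.pyRange_one_eq_nil (by omega), List.map_nil]
      intro hc
      have : 1 ≤ n := by
        rw [hn]
        have hx := (pvAxisBound_pos_iff p0 x).mpr ⟨hc.1, hc.2.1⟩
        have hy := (pvAxisBound_pos_iff p1 y).mpr ⟨hc.2.2.1, hc.2.2.2⟩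
        omega
      omega

-- per-vector equality of the two fold bodies, then fold induction
theorem pv_fold_eq (pos : Int × Int) :
    ∀ (vectors : List (Int × Int)) (acc : List (List (Int × Int))),
      Pre_get_all_moves_sliders_py pos vectors →
      vectors.foldl
        (fun moves v =>
          let move_list := pvWalkA (pos.1 + v.1, pos.2 + v.2) v.1 v.2 16
          if move_list ≠ [] then moves ++ [move_list] else moves) acc
      = vectors.foldl
        (fun moves v =>
          let n := min (pvAxisBound pos.1 v.1) (pvAxisBound pos.2 v.2)
          if 1 ≤ n then
            moves ++ [(PySem.List.pyRange 1 (n + 1) 1).map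
              (fun k => (pos.1 + k * v.1, pos.2 + k * v.2))]
          else moves) acc := by
  intro vectors
  induction vectors with
  | nil => intro acc _; rfl
  | cons v vs ih =>
    intro acc hpre
    have hpre' : Pre_get_all_moves_sliders_py pos vs := by
      intro hm; exact hpre (List.mem_cons_of_mem _ hm)
    simp only [List.foldl_cons]
    rw [ih _ hpre']
    congr 1
    set n := min (pvAxisBound pos.1 v.1) (pvAxisBound pos.2 v.2) with hn
    have hv : v.1 = 0 ∧ v.2 = 0 → n ≤ 0 := by
      intro hc
      have hmem : ((0, 0) : Int × Int) ∈ v :: vs := by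
        have : v = (0, 0) := Prod.ext hc.1 hc.2
        rw [← this]; exact List.mem_cons_self
      have hoff := hpre hmem
      by_cases h0 : 0 ≤ pos.1 ∧ pos.1 ≤ 7
      · have h2 : ¬ (0 ≤ pos.2 ∧ pos.2 ≤ 7) := by
          intro hc2; exact hoff ⟨h0.1, h0.2, hc2.1, hc2.2⟩
        have e2 : pvAxisBound pos.2 v.2 = 0 := by
          rw [hc.2]; unfold pvAxisBound; rw [if_pos rfl, if_neg h2]
        omega
      · have e1 : pvAxisBound pos.1 v.1 = 0 := by
          rw [hc.1]; unfold pvAxisBound; rw [if_pos rfl, if_neg h0]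
        omega
    have hbound : n.toNat < 16 := by
      by_cases hc : v.1 = 0 ∧ v.2 = 0
      · have := hv hc; omega
      · rcases not_and_or.mp hc with h | h
        · have := pvAxisBound_le_8 pos.1 v.1 h; omega
        · have := pvAxisBound_le_8 pos.2 v.2 h; omega
    have hwalk := pvWalkA_eq_ray v.1 v.2 16 pos.1 pos.2 (by intro hc; have := hv hc; omega)
      (by rw [← hn]; exact hbound)
    rw [← hn] at hwalk
    have key : ¬ ((PySem.List.pyRange 1 (n + 1) 1).map
        (fun k => (pos.1 + k * v.1, pos.2 + k * v.2)) = []) ↔ 1 ≤ n := by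
      rw [← List.length_eq_zero_iff, List.length_map, PySem.List.length_pyRange_one]
      omega
    simp only [hwalk, ne_eq]
    split_ifs with hA hB hB
    · exact absurd hA (key.mpr hB)
    · rfl
    · rfl
    · exact absurd (key.mp hA) hB

-- ===== VERDICT (by name: the statement is the Claim_ definition above) =====
theorem get_all_moves_sliders_py_spec : Claim_equal_get_all_moves_sliders_py := by
  intro pos vectors _ hpre
  unfold Spec_get_all_moves_sliders_py get_all_moves_sliders_py get_all_moves_sliders_py_alt
  exact pv_fold_eq pos vectors [] hpre
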